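-- pv_equiv track=rewrite | github.com/matthewhand/open-swarm | src/swarm/utils/message_utils.py | filter_duplicate_system_messages
-- ===== SOURCE A (Python) =====
-- def filter_duplicate_system_messages(messages):
--     """Remove duplicate system messages, keeping only the first occurrence."""
--     filtered = []
--     system_found = False
--     for msg in messages:
--         if msg.get("role") == "system":
--             if system_found:
--                 continue
--             system_found = True
--         filtered.append(msg)
--     return filtered
-- ===== SOURCE B (Python) =====
-- def filter_duplicate_system_messages(messages):
--     """Remove duplicate system messages, keeping only the first occurrence."""
--     msgs = list(messages)
--     first = next((i for i, m in enumerate(msgs) if m.get("role") == "system"), None)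
--     return [m for i, m in enumerate(msgs) if m.get("role") != "system" or i == first]
-- ===== Notes on version B (the rewrite author's own statement) =====
-- stated objective: alternative
-- what changed: Replaces the single scan carrying a system_found flag by two passes: first locate the index of the first system message, then filter with a comprehension keeping non-system messages plus the message at that index.
import Mathlib
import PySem

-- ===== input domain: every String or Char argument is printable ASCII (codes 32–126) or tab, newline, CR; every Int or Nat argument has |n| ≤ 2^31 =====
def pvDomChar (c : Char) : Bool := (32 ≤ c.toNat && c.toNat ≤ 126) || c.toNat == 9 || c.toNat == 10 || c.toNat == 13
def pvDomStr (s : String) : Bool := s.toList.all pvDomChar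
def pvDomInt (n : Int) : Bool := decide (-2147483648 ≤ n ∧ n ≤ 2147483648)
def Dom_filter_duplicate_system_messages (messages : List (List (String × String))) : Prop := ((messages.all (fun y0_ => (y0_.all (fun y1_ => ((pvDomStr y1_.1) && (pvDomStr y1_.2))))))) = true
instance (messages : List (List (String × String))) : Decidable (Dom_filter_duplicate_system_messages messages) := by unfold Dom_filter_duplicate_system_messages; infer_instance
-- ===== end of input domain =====

-- B is an alternative decomposition (find the first system index, then filter in a second pass)
-- rather than A's single scan with a carried flag; same asymptotic cost, return value proved equal.

-- msg.get("role") == "system"  (dict = association list, first match wins)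
def pvIsSystem (msg : List (String × String)) : Bool :=
  ((msg.find? (fun p => p.1 == "role")).map (·.2)) == some "system"

-- ===== PORT A =====  (one scan carrying (filtered, system_found))
def filter_duplicate_system_messages (messages : List (List (String × String))) : List (List (String × String)) :=
  (messages.foldl
    (fun (st : List (List (String × String)) × Bool) msg =>
      if pvIsSystem msg then
        if st.2 then st else (st.1 ++ [msg], true)
      else
        (st.1 ++ [msg], st.2))
    ([], false)).1

-- ===== PORT B =====  (two passes: first index of a system message, then a filtering comprehension)
def filter_duplicate_system_messages_alt (messages : List (List (String × String))) : List (List (String × String)) :=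
  let first : Option Int :=
    ((PySem.List.enumerate messages).find? (fun p => pvIsSystem p.2)).map (·.1)
  ((PySem.List.enumerate messages).filter
      (fun p => !(pvIsSystem p.2) || (some p.1 == first))).map (·.2)

-- ===== PRECONDITION & SPEC =====
def Spec_filter_duplicate_system_messages (messages : List (List (String × String))) (out : List (List (String × String))) : Prop := out = filter_duplicate_system_messages_alt messages
instance (messages : List (List (String × String))) (out : List (List (String × String))) : Decidable (Spec_filter_duplicate_system_messages messages out) := by unfold Spec_filter_duplicate_system_messages; infer_instance

-- ===== CLAIM (what is proved, stated in full; the proofs are below) =====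
def Claim_equal_filter_duplicate_system_messages : Prop := ∀ (messages : List (List (String × String))), Dom_filter_duplicate_system_messages messages → Spec_filter_duplicate_system_messages messages (filter_duplicate_system_messages messages)

-- ===== LEMMAS AND PROOFS =====

-- reference recursion: A's loop without the accumulator
def pvGo (found : Bool) : List (List (String × String)) → List (List (String × String))
  | [] => []
  | m :: r =>
    if pvIsSystem m then
      if found then pvGo true r else m :: pvGo true r
    else
      m :: pvGo found r

theorem pvA_loop (msgs : List (List (String × String)))
    (acc : List (List (String × String))) (b : Bool) :
    (msgs.foldl
      (fun (st : List (List (String × String)) × Bool) msg =>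
        if pvIsSystem msg then
          if st.2 then st else (st.1 ++ [msg], true)
        else
          (st.1 ++ [msg], st.2))
      (acc, b)).1 = acc ++ pvGo b msgs := by
  induction msgs generalizing acc b with
  | nil => simp [pvGo]
  | cons m r ih =>
    simp only [List.foldl_cons, pvGo]
    by_cases hs : pvIsSystem m <;> by_cases hb : b <;>
      simp [hs, hb, ih, List.append_assoc]

theorem pvGo_true (msgs : List (List (String × String))) :
    pvGo true msgs = msgs.filter (fun m => !(pvIsSystem m)) := by
  induction msgs with
  | nil => rfl
  | cons m r ih =>
    by_cases hs : pvIsSystem m <;> simp [pvGo, hs, ih]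

-- after the first system message, the index test never fires again
theorem pvFilter_past (msgs : List (List (String × String))) (s j : Int) (h : j < s) :
    ((PySem.List.enumerate msgs s).filter
        (fun p => !(pvIsSystem p.2) || (p.1 == j))).map (·.2)
      = msgs.filter (fun m => !(pvIsSystem m)) := by
  induction msgs generalizing s with
  | nil => rfl
  | cons m r ih =>
    rw [PySem.List.enumerate_cons]
    have hne : (s == j) = false := by
      simp only [beq_eq_false_iff_ne, ne_eq]; omega
    by_cases hs : pvIsSystem m <;>
      simp [hs, hne, ih (s + 1) (by omega)]

theorem pvB_gen (msgs : List (List (String × String))) (s : Int) :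
    ((PySem.List.enumerate msgs s).filter
        (fun p => !(pvIsSystem p.2) ||
          (some p.1 == ((PySem.List.enumerate msgs s).find? (fun q => pvIsSystem q.2)).map (·.1)))).map (·.2)
      = pvGo false msgs := by
  induction msgs generalizing s with
  | nil => rfl
  | cons m r ih =>
    rw [PySem.List.enumerate_cons]
    by_cases hs : pvIsSystem m
    · -- first system message is at index s; keep it, then drop every later system message
      simp only [List.find?_cons, hs, pvGo, List.filter_cons]
      simp only [Option.map_some, beq_self_eq_true, Bool.or_true, if_true, pvGo_true]
      simp only [Option.some_beq_some, List.map_cons]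
      rw [pvFilter_past r (s + 1) s (by omega)]
      simp
    · simp only [List.find?_cons, hs, pvGo, List.filter_cons]
      simp only [Bool.false_eq_true, if_false]
      simp [ih (s + 1)]

-- ===== VERDICT (by name: the statement is the Claim_ definition above) =====
theorem filter_duplicate_system_messages_spec : Claim_equal_filter_duplicate_system_messages := by
  intro messages _
  unfold Spec_filter_duplicate_system_messages filter_duplicate_system_messages filter_duplicate_system_messages_alt
  rw [pvA_loop messages [] false, List.nil_append, pvB_gen messages 0]
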